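-- pv_equiv track=rewrite | github.com/rrtucci/SentenceAx | utils_tree.py | count_leaf_nodes
-- ===== SOURCE A (Python) =====
-- def get_all_nodes(polytree):
--     """
--     This method returns a list of all nodes of polytree `polytree`.
--
--     This method works whether polytree has empty leafs or not. If it does,
--     empty leaf nodes are not included in output list.
--
--     Parameters
--     ----------
--     polytree: dict[str, list[str]]
--
--     Returns
--     -------
--     list[str]
--
--     """
--     all_nodes = []
--     for parent, children in polytree.items():
--         if parent not in all_nodes:
--             all_nodes.append(parent)
--         for child in children:
--             if child and child not in all_nodes:
--                 all_nodes.append(child)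
--     return all_nodes
--
-- def count_leaf_nodes(polytree):
--     """
--     This method returns a tuple with the number of empty and nonempty leaf
--     nodes in polytree `polytree`.
--
--     This method works whether polytree has empty leafs or not.
--
--     Parameters
--     ----------
--     polytree: dict[str, list[str]]
--
--     Returns
--     -------
--     tuple[int, int]
--
--     """
--     empty_leaf_count = 0
--     nonempty_leaf_count = 0
--     all_nodes = get_all_nodes(polytree)
--     for node in all_nodes:
--         if node not in polytree:
--             nonempty_leaf_count += 1
--         else:
--             if polytree[node] == []:
--                 empty_leaf_count += 1
--     return (empty_leaf_count, nonempty_leaf_count)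
-- ===== SOURCE B (Python) =====
-- def count_leaf_nodes(polytree):
--     empty_leaf_count = sum(1 for children in polytree.values() if children == [])
--     leaves = set()
--     for children in polytree.values():
--         for child in children:
--             if child and child not in polytree:
--                 leaves.add(child)
--     return (empty_leaf_count, len(leaves))
-- ===== Notes on version B (the rewrite author's own statement) =====
-- stated objective: faster
-- what changed: Drops the get_all_nodes helper and the classification pass over it: empty leaves are counted directly as values that are empty lists, and nonempty leaves are collected in one pass into a hash set of truthy children that are not keys.
import Mathlib
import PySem

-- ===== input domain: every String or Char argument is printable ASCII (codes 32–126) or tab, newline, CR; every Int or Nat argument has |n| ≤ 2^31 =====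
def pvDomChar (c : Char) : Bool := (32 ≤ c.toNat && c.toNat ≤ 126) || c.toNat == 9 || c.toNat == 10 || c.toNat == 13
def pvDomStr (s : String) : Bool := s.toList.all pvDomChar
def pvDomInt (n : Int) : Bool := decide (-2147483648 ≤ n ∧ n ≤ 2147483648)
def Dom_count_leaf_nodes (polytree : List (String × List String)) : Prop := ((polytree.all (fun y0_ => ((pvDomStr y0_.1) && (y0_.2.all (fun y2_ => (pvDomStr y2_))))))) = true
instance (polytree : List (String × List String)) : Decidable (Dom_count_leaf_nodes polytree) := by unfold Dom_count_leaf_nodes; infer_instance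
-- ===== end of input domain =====

-- B drops the get_all_nodes helper and its classification pass: it counts [] values directly
-- and collects the distinct truthy non-key children into a set (objective: simpler).


-- ===== PORT A =====
-- the association list stands for a Python dict: both ports read it through PySem.Dict.ofList
def get_all_nodes (polytree : PySem.Dict String (List String)) : List String :=
  polytree.items.foldl (fun all_nodes pc =>
    let all_nodes := if pc.1 ∉ all_nodes then all_nodes ++ [pc.1] else all_nodes
    pc.2.foldl (fun all_nodes child =>
      if child ≠ "" ∧ child ∉ all_nodes then all_nodes ++ [child] else all_nodes) all_nodes) []

def count_leaf_nodes (polytree : List (String × List String)) : Int × Int :=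
  let d := PySem.Dict.ofList polytree
  (get_all_nodes d).foldl (fun (c : Int × Int) node =>
    if ¬ d.contains node then (c.1, c.2 + 1)
    else if d.getD node [] = [] then (c.1 + 1, c.2) else c) (0, 0)

-- ===== PORT B =====
def count_leaf_nodes_alt (polytree : List (String × List String)) : Int × Int :=
  let d := PySem.Dict.ofList polytree
  let empty_leaf_count : Int := (d.values.countP (fun children => children = []) : Int)
  let leaves : PySem.Set String := d.values.foldl (fun s children =>
    children.foldl (fun s child =>
      if child ≠ "" ∧ ¬ d.contains child then PySem.Set.add s child else s) s) PySem.Set.empty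
  (empty_leaf_count, (leaves.length : Int))

-- ===== PRECONDITION & SPEC =====
def Spec_count_leaf_nodes (polytree : List (String × List String)) (out : Int × Int) : Prop := out = count_leaf_nodes_alt polytree
instance (polytree : List (String × List String)) (out : Int × Int) : Decidable (Spec_count_leaf_nodes polytree out) := by unfold Spec_count_leaf_nodes; infer_instance

-- ===== CLAIM (what is proved, stated in full; the proofs are below) =====
def Claim_equal_count_leaf_nodes : Prop := ∀ (polytree : List (String × List String)), Dom_count_leaf_nodes polytree → Spec_count_leaf_nodes polytree (count_leaf_nodes polytree)

-- ===== LEMMAS AND PROOFS =====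

-- A's counting loop is two countP's over all_nodes
theorem a_fold_count (d : PySem.Dict String (List String)) (l : List String) (c : Int × Int) :
    l.foldl (fun (c : Int × Int) node =>
      if ¬ d.contains node then (c.1, c.2 + 1)
      else if d.getD node [] = [] then (c.1 + 1, c.2) else c) c
    = (c.1 + (l.countP fun n => d.contains n && decide (d.getD n [] = [])),
       c.2 + (l.countP fun n => !d.contains n)) := by
  induction l generalizing c with
  | nil => simp
  | cons x xs ih =>
    simp only [List.foldl_cons, List.countP_cons]
    rw [ih]
    by_cases h1 : d.contains x = true <;> by_cases h2 : d.getD x [] = [] <;>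
      simp [h1, h2, Prod.ext_iff] <;> push_cast <;> omega

-- membership in A's inner children loop
theorem mem_inner (children : List String) (acc : List String) (y : String) :
    y ∈ children.foldl (fun all child =>
      if child ≠ "" ∧ child ∉ all then all ++ [child] else all) acc
    ↔ y ∈ acc ∨ (y ∈ children ∧ y ≠ "") := by
  induction children generalizing acc with
  | nil => simp
  | cons x xs ih =>
    simp only [List.foldl_cons]
    split_ifs with h
    · rw [ih]
      rcases eq_or_ne y x with rfl | hyx
      · simp [List.mem_append, h.1]
      · simp [List.mem_append, hyx]
    · rw [ih]
      rcases eq_or_ne y x with rfl | hyx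
      · rcases not_and_or.1 h with h' | h'
        · rw [not_not] at h'; simp [h']
        · rw [not_not] at h'; simp [h']
      · simp [hyx]

-- membership in A's all_nodes accumulation
theorem mem_get_all_nodes_aux (items : List (String × List String)) (acc : List String) (y : String) :
    y ∈ items.foldl (fun all_nodes pc =>
      let all_nodes := if pc.1 ∉ all_nodes then all_nodes ++ [pc.1] else all_nodes
      pc.2.foldl (fun all_nodes child =>
        if child ≠ "" ∧ child ∉ all_nodes then all_nodes ++ [child] else all_nodes) all_nodes) acc
    ↔ y ∈ acc ∨ y ∈ items.map Prod.fst ∨ ∃ p ∈ items, y ∈ p.2 ∧ y ≠ "" := by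
  induction items generalizing acc with
  | nil => simp
  | cons p ps ih =>
    simp only [List.foldl_cons, ih, mem_inner, List.map_cons, List.mem_cons, exists_eq_or_imp]
    split_ifs with hp
    · rcases eq_or_ne y p.1 with rfl | hyp
      · simp [hp]
      · simp [hyp, List.mem_append]; tauto
    · rcases eq_or_ne y p.1 with rfl | hyp
      · simp [hp, List.mem_append]
      · simp [hyp, List.mem_append]; tauto

theorem nodup_inner (children : List String) (acc : List String) (h : acc.Nodup) :
    (children.foldl (fun all child =>
      if child ≠ "" ∧ child ∉ all then all ++ [child] else all) acc).Nodup := by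
  induction children generalizing acc with
  | nil => exact h
  | cons x xs ih =>
    simp only [List.foldl_cons]
    split_ifs with hx
    · exact ih _ (h.append (List.nodup_singleton x) (by
        intro a ha hb; simp at hb; exact hx.2 (hb ▸ ha)))
    · exact ih _ h

theorem nodup_get_all_nodes_aux (items : List (String × List String)) (acc : List String) (h : acc.Nodup) :
    (items.foldl (fun all_nodes pc =>
      let all_nodes := if pc.1 ∉ all_nodes then all_nodes ++ [pc.1] else all_nodes
      pc.2.foldl (fun all_nodes child =>
        if child ≠ "" ∧ child ∉ all_nodes then all_nodes ++ [child] else all_nodes) all_nodes) acc).Nodup := by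
  induction items generalizing acc with
  | nil => exact h
  | cons p ps ih =>
    simp only [List.foldl_cons]
    apply ih
    apply nodup_inner
    split_ifs with hp
    · exact h
    · exact h.append (List.nodup_singleton p.1) (by
        intro a ha hb; simp at hb; exact hp (hb ▸ ha))

-- membership in B's inner loop over one children list
theorem mem_leaves_inner (d : PySem.Dict String (List String)) (v : List String) (s : PySem.Set String) (y : String) :
    y ∈ v.foldl (fun s child =>
      if child ≠ "" ∧ ¬ d.contains child then PySem.Set.add s child else s) s
    ↔ y ∈ s ∨ (y ∈ v ∧ y ≠ "" ∧ ¬ d.contains y) := by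
  induction v generalizing s with
  | nil => simp
  | cons x xs ih =>
    simp only [List.foldl_cons, List.mem_cons]
    split_ifs with h
    · rw [ih]
      rcases eq_or_ne y x with rfl | hyx
      · simp [PySem.Set.mem_add, h.1, h.2]
      · simp [PySem.Set.mem_add, hyx]
    · rw [ih]
      rcases eq_or_ne y x with rfl | hyx
      · rcases not_and_or.1 h with h' | h'
        · rw [not_not] at h'; simp [h']
        · rw [not_not] at h'; simp [h']
      · simp [hyx]

-- membership in B's leaves set
theorem mem_leaves_aux (d : PySem.Dict String (List String)) (vs : List (List String)) (s : PySem.Set String) (y : String) :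
    y ∈ vs.foldl (fun s children =>
      children.foldl (fun s child =>
        if child ≠ "" ∧ ¬ d.contains child then PySem.Set.add s child else s) s) s
    ↔ y ∈ s ∨ ∃ v ∈ vs, y ∈ v ∧ y ≠ "" ∧ ¬ d.contains y := by
  induction vs generalizing s with
  | nil => simp
  | cons v vs ih =>
    simp only [List.foldl_cons, ih, mem_leaves_inner, List.mem_cons, exists_eq_or_imp]
    tauto

theorem nodup_leaves_inner (d : PySem.Dict String (List String)) (v : List String) (s : PySem.Set String) (h : s.Nodup) :
    (v.foldl (fun s child =>
      if child ≠ "" ∧ ¬ d.contains child then PySem.Set.add s child else s) s).Nodup := by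
  induction v generalizing s with
  | nil => exact h
  | cons x xs ih =>
    simp only [List.foldl_cons]
    split_ifs with hx
    · exact ih _ (PySem.Set.nodup_add _ _ h)
    · exact ih _ h

theorem nodup_leaves_aux (d : PySem.Dict String (List String)) (vs : List (List String)) (s : PySem.Set String) (h : s.Nodup) :
    (vs.foldl (fun s children =>
      children.foldl (fun s child =>
        if child ≠ "" ∧ ¬ d.contains child then PySem.Set.add s child else s) s) s).Nodup := by
  induction vs generalizing s with
  | nil => exact h
  | cons v vs ih => exact ih _ (nodup_leaves_inner d v s h)

-- two Nodup lists with the same members have the same length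
theorem length_eq_of_nodup_mem {α : Type} (l1 l2 : List α) (h1 : l1.Nodup) (h2 : l2.Nodup)
    (h : ∀ x, x ∈ l1 ↔ x ∈ l2) : l1.length = l2.length :=
  ((List.perm_ext_iff_of_nodup h1 h2).2 h).length_eq

-- A's empty-leaf count over all_nodes is B's count of [] values
theorem empty_count_eq (d : PySem.Dict String (List String)) (hkn : d.keys.Nodup) :
    ((get_all_nodes d).countP fun n => d.contains n && decide (d.getD n [] = []))
    = d.values.countP (fun v => decide (v = [])) := by
  calc (get_all_nodes d).countP (fun n => d.contains n && decide (d.getD n [] = []))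
      = d.keys.countP (fun n => d.contains n && decide (d.getD n [] = [])) := by
        rw [List.countP_eq_length_filter, List.countP_eq_length_filter]
        apply length_eq_of_nodup_mem _ _
          ((nodup_get_all_nodes_aux d.items [] List.nodup_nil).filter _) (hkn.filter _)
        intro y
        simp only [List.mem_filter, mem_get_all_nodes_aux, List.not_mem_nil, false_or]
        constructor
        · rintro ⟨_, hp⟩
          have hp' := hp
          rw [Bool.and_eq_true] at hp'
          exact ⟨(PySem.Dict.contains_iff_mem_keys d y).1 hp'.1, hp⟩
        · rintro ⟨hy, hp⟩
          exact ⟨Or.inl hy, hp⟩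
    _ = d.keys.countP (fun k => decide (d.getD k [] = [])) :=
        List.countP_congr (fun k hk => by
          simp [(PySem.Dict.contains_iff_mem_keys d k).2 hk])
    _ = d.items.countP (fun p => decide (d.getD p.1 [] = [])) := by
        show (d.items.map Prod.fst).countP _ = _
        rw [List.countP_map]; rfl
    _ = d.items.countP (fun p => decide (p.2 = [])) :=
        List.countP_congr (fun p hp => by
          rw [PySem.Dict.getD_of_mem_items d (by simpa using hp) hkn])
    _ = d.values.countP (fun v => decide (v = [])) := by
        show _ = (d.items.map Prod.snd).countP _
        rw [List.countP_map]; rfl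

-- A's nonempty-leaf count over all_nodes is the size of B's leaves set
theorem nonempty_count_eq (d : PySem.Dict String (List String)) :
    ((get_all_nodes d).countP fun n => !d.contains n)
    = (d.values.foldl (fun s children =>
        children.foldl (fun s child =>
          if child ≠ "" ∧ ¬ d.contains child then PySem.Set.add s child else s) s)
        PySem.Set.empty).length := by
  rw [List.countP_eq_length_filter]
  apply length_eq_of_nodup_mem _ _
    ((nodup_get_all_nodes_aux d.items [] List.nodup_nil).filter _)
    (nodup_leaves_aux d d.values _ List.nodup_nil)
  intro y
  rw [List.mem_filter, mem_get_all_nodes_aux, mem_leaves_aux]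
  simp only [List.not_mem_nil, false_or, Bool.not_eq_eq_eq_not, Bool.not_true,
    PySem.Set.empty]
  constructor
  · rintro ⟨hy | ⟨p, hp, hy2, hne⟩, hc⟩
    · exact absurd ((PySem.Dict.contains_iff_mem_keys d y).2 hy) (by simp [hc])
    · refine ⟨p.2, List.mem_map_of_mem hp, hy2, hne, by simp [hc]⟩
  · rintro ⟨v, hv, hy, hne, hc⟩
    have hv' : v ∈ d.items.map Prod.snd := hv
    obtain ⟨p, hp, rfl⟩ := List.mem_map.1 hv'
    exact ⟨Or.inr ⟨p, hp, hy, hne⟩, by simpa using hc⟩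

-- ===== VERDICT (by name: the statement is the Claim_ definition above) =====
theorem count_leaf_nodes_spec : Claim_equal_count_leaf_nodes := by
  intro polytree _
  unfold Spec_count_leaf_nodes count_leaf_nodes count_leaf_nodes_alt
  have hkn : (PySem.Dict.ofList polytree).keys.Nodup := PySem.Dict.nodup_keys_ofList polytree
  rw [a_fold_count, empty_count_eq _ hkn, nonempty_count_eq]
  simp
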